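-- pv_equiv track=rewrite | github.com/mortholl/Transpiration-ML-Project | utilities/data_split_sanitize.py | season_split
-- ===== SOURCE A (Python) =====
-- def season_split(x, y, times, seasons):
--     # Split x and y into seasons based on the month of the corresponding timestamps
--     # Based on the input season(s), return x, y, and the timestamps for that season(s)
--     new_x = []
--     new_y = []
--     new_times = []
--     for i, time in enumerate(times):
--         month = time[5:7]
--         if 'spring' in seasons:
--             if month == '09' or month == '10' or month == '11':
--                 new_x.append(x[i])
--                 new_y.append(y[i])
--                 new_times.append(time)
--         if 'summer' in seasons:
--             if month == '12' or month == '01' or month == '02':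
--                 new_x.append(x[i])
--                 new_y.append(y[i])
--                 new_times.append(time)
--         if 'fall' in seasons:
--             if month == '03' or month == '04' or month == '05':
--                 new_x.append(x[i])
--                 new_y.append(y[i])
--                 new_times.append(time)
--         if 'winter' in seasons:
--             if month == '06' or month == '07' or month == '08':
--                 new_x.append(x[i])
--                 new_y.append(y[i])
--                 new_times.append(time)
--     return new_x, new_y, new_times
-- ===== SOURCE B (Python) =====
-- def season_split(x, y, times, seasons):
--     # One precomputed season->months table and a single membership test per
--     # timestamp, instead of four repeated branch chains inside the loop.
--     groups = {'spring': ['09', '10', '11'], 'summer': ['12', '01', '02'],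
--               'fall': ['03', '04', '05'], 'winter': ['06', '07', '08']}
--     valid = set()
--     for name, months in groups.items():
--         if name in seasons:
--             valid.update(months)
--     new_x = []
--     new_y = []
--     new_times = []
--     for i, time in enumerate(times):
--         if time[5:7] in valid:
--             new_x.append(x[i])
--             new_y.append(y[i])
--             new_times.append(time)
--     return new_x, new_y, new_times
-- ===== Notes on version B (the rewrite author's own statement) =====
-- stated objective: faster
-- what changed: A's four repeated season-branch chains (each scanning the seasons list and re-testing the month substring) per timestamp are replaced by a season->months table built once into a set of valid month codes and a single set-membership test in one pass.
import Mathlib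
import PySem

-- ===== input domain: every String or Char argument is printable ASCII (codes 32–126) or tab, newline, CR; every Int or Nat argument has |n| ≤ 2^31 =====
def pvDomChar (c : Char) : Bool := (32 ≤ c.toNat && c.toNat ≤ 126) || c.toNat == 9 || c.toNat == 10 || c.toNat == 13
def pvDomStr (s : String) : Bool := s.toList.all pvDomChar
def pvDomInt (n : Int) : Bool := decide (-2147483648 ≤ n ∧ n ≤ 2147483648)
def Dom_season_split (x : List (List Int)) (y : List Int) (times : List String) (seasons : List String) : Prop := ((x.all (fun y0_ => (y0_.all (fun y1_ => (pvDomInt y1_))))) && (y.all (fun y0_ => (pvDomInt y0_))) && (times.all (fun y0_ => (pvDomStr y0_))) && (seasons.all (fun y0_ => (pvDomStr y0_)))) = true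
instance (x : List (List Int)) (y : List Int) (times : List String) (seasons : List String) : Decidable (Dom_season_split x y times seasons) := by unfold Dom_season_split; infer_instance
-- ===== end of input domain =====

-- B replaces A's four per-item season branch chains by one precomputed season→months
-- table turned into a set of valid month codes and a single membership test per item
-- (objective: simpler). Equivalence is about the return value; neither mutates arguments.

-- ===== PORT A =====
def season_split (x : List (List Int)) (y : List Int) (times : List String) (seasons : List String) : List (List Int) × List Int × List String :=
  (PySem.List.enumerate times).foldl
    (fun st it =>
      let month := PySem.Str.slice it.2 (some 5) (some 7)
      let st := if seasons.contains "spring" then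
          (if month == "09" || month == "10" || month == "11" then
            (st.1 ++ [PySem.List.pyGetD x it.1 []], st.2.1 ++ [PySem.List.pyGetD y it.1 0], st.2.2 ++ [it.2])
          else st) else st
      let st := if seasons.contains "summer" then
          (if month == "12" || month == "01" || month == "02" then
            (st.1 ++ [PySem.List.pyGetD x it.1 []], st.2.1 ++ [PySem.List.pyGetD y it.1 0], st.2.2 ++ [it.2])
          else st) else st
      let st := if seasons.contains "fall" then
          (if month == "03" || month == "04" || month == "05" then
            (st.1 ++ [PySem.List.pyGetD x it.1 []], st.2.1 ++ [PySem.List.pyGetD y it.1 0], st.2.2 ++ [it.2])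
          else st) else st
      if seasons.contains "winter" then
          (if month == "06" || month == "07" || month == "08" then
            (st.1 ++ [PySem.List.pyGetD x it.1 []], st.2.1 ++ [PySem.List.pyGetD y it.1 0], st.2.2 ++ [it.2])
          else st) else st)
    ([], [], [])

-- ===== PORT B =====
-- the `groups` dict of Source B (an association list in insertion order)
def sgroups : List (String × List String) :=
  [("spring", ["09","10","11"]), ("summer", ["12","01","02"]),
   ("fall", ["03","04","05"]), ("winter", ["06","07","08"])]

-- Source B's `valid` set: union of the month groups of the selected seasons
def validMonths (seasons : List String) : PySem.Set String :=
  sgroups.foldl (fun v p => if seasons.contains p.1 then PySem.Set.update v p.2 else v)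
    PySem.Set.empty

def season_split_alt (x : List (List Int)) (y : List Int) (times : List String) (seasons : List String) : List (List Int) × List Int × List String :=
  let valid := validMonths seasons
  (PySem.List.enumerate times).foldl
    (fun st it =>
      if PySem.Set.contains valid (PySem.Str.slice it.2 (some 5) (some 7)) then
        (st.1 ++ [PySem.List.pyGetD x it.1 []], st.2.1 ++ [PySem.List.pyGetD y it.1 0], st.2.2 ++ [it.2])
      else st)
    ([], [], [])

-- ===== PRECONDITION & SPEC =====
-- Whether index i is appended, as one boolean condition on the input (used only by Pre_)
def monthHit (seasons : List String) (t : String) : Bool :=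
  let m := PySem.Str.slice t (some 5) (some 7)
  (seasons.contains "spring" && (m == "09" || m == "10" || m == "11")) ||
  (seasons.contains "summer" && (m == "12" || m == "01" || m == "02")) ||
  (seasons.contains "fall" && (m == "03" || m == "04" || m == "05")) ||
  (seasons.contains "winter" && (m == "06" || m == "07" || m == "08"))

-- Pre_ excludes exactly the inputs where Python A raises IndexError: a timestamp whose
-- month matches a selected season at a position past the end of x or y.
def Pre_season_split (x : List (List Int)) (y : List Int) (times : List String) (seasons : List String) : Prop :=
  ∀ i ∈ List.range times.length, monthHit seasons (times.getD i "") = true → i < x.length ∧ i < y.length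
instance (x : List (List Int)) (y : List Int) (times : List String) (seasons : List String) : Decidable (Pre_season_split x y times seasons) := by unfold Pre_season_split; infer_instance

def pvWitness_season_split : List (List Int) × List Int × List String × List String :=
  ([[1], [2]], [3, 4], ["2020-07-15", "2020-01-02"], ["winter", "summer"])

def Spec_season_split (x : List (List Int)) (y : List Int) (times : List String) (seasons : List String) (out : List (List Int) × List Int × List String) : Prop := out = season_split_alt x y times seasons
instance (x : List (List Int)) (y : List Int) (times : List String) (seasons : List String) (out : List (List Int) × List Int × List String) : Decidable (Spec_season_split x y times seasons out) := by unfold Spec_season_split; infer_instance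

-- ===== CLAIM (what is proved, stated in full; the proofs are below) =====
def Claim_equal_season_split : Prop := ∀ (x : List (List Int)) (y : List Int) (times : List String) (seasons : List String), Dom_season_split x y times seasons → Pre_season_split x y times seasons → Spec_season_split x y times seasons (season_split x y times seasons)

-- ===== LEMMAS AND PROOFS =====
lemma mem_validMonths (seasons : List String) (m : String) :
    m ∈ validMonths seasons ↔
      ((seasons.contains "spring" ∧ (m = "09" ∨ m = "10" ∨ m = "11")) ∨
       (seasons.contains "summer" ∧ (m = "12" ∨ m = "01" ∨ m = "02")) ∨
       (seasons.contains "fall" ∧ (m = "03" ∨ m = "04" ∨ m = "05")) ∨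
       (seasons.contains "winter" ∧ (m = "06" ∨ m = "07" ∨ m = "08"))) := by
  unfold validMonths sgroups
  simp only [List.foldl]
  split_ifs <;> simp_all [PySem.Set.empty] <;> tauto

lemma contains_validMonths (seasons : List String) (m : String) :
    PySem.Set.contains (validMonths seasons) m =
      ((seasons.contains "spring" && (m == "09" || m == "10" || m == "11")) ||
       (seasons.contains "summer" && (m == "12" || m == "01" || m == "02")) ||
       (seasons.contains "fall" && (m == "03" || m == "04" || m == "05")) ||
       (seasons.contains "winter" && (m == "06" || m == "07" || m == "08"))) := by
  rw [Bool.eq_iff_iff]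
  simp [mem_validMonths]
  tauto

lemma step_chain {S : Type} (seasons : List String) (m : String) (app : S → S) (st : S) :
    (let t1 := if seasons.contains "spring" then
        (if m == "09" || m == "10" || m == "11" then app st else st) else st
     let t2 := if seasons.contains "summer" then
        (if m == "12" || m == "01" || m == "02" then app t1 else t1) else t1
     let t3 := if seasons.contains "fall" then
        (if m == "03" || m == "04" || m == "05" then app t2 else t2) else t2
     if seasons.contains "winter" then
        (if m == "06" || m == "07" || m == "08" then app t3 else t3) else t3)
    = if PySem.Set.contains (validMonths seasons) m then app st else st := by
  rw [contains_validMonths]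
  by_cases hm : m ∈ ["09","10","11","12","01","02","03","04","05","06","07","08"]
  · fin_cases hm <;> simp
  · simp only [List.mem_cons, List.not_mem_nil, or_false, not_or] at hm
    obtain ⟨h1, h2, h3, h4, h5, h6, h7, h8, h9, h10, h11, h12⟩ := hm
    simp [h1, h2, h3, h4, h5, h6, h7, h8, h9, h10, h11, h12]

lemma season_split_eq_alt (x : List (List Int)) (y : List Int) (times : List String) (seasons : List String) :
    season_split x y times seasons = season_split_alt x y times seasons := by
  unfold season_split season_split_alt
  apply List.foldl_ext
  intro st it _
  exact step_chain seasons (PySem.Str.slice it.2 (some 5) (some 7))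
    (fun s => (s.1 ++ [PySem.List.pyGetD x it.1 []], s.2.1 ++ [PySem.List.pyGetD y it.1 0], s.2.2 ++ [it.2])) st

-- ===== VERDICT (by name: the statement is the Claim_ definition above) =====
theorem season_split_spec : Claim_equal_season_split := by
  intro x y times seasons _ _
  unfold Spec_season_split
  exact season_split_eq_alt x y times seasons
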